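-- pv_equiv track=rewrite | github.com/varun-ag1/unpod | apps/super/super/app/call_profile.py | _calculate_preferred_time
-- ===== SOURCE A (Python) =====
-- from typing import Dict, List, Optional
--
-- def _calculate_preferred_time(call_hours: List[int]) -> str:
--     if not call_hours:
--         return "None"
--
--     # Define time slots
--     time_slots = {
--         "Early Morning (6AM-9AM)": range(6, 9),
--         "Morning (9AM-12PM)": range(9, 12),
--         "Afternoon (12PM-3PM)": range(12, 15),
--         "Late Afternoon (3PM-6PM)": range(15, 18),
--         "Evening (6PM-9PM)": range(18, 21),
--         "Night (9PM-12AM)": range(21, 24),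
--     }
--
--     # Count calls in each slot
--     slot_counts = {slot: 0 for slot in time_slots}
--     for hour in call_hours:
--         for slot_name, hour_range in time_slots.items():
--             if hour in hour_range:
--                 slot_counts[slot_name] += 1
--                 break
--
--     # Find most common slot
--     if max(slot_counts.values()) == 0:
--         return "None"
--
--     preferred_slot = max(slot_counts, key=slot_counts.get)
--     return preferred_slot
-- ===== SOURCE B (Python) =====
-- from typing import List
--
-- _SLOT_NAMES = [
--     "Early Morning (6AM-9AM)",
--     "Morning (9AM-12PM)",
--     "Afternoon (12PM-3PM)",
--     "Late Afternoon (3PM-6PM)",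
--     "Evening (6PM-9PM)",
--     "Night (9PM-12AM)",
-- ]
--
-- def _calculate_preferred_time(call_hours: List[int]) -> str:
--     counts = [0] * 6
--     for hour in call_hours:
--         if 6 <= hour < 24:
--             counts[(hour - 6) // 3] += 1
--     m = max(counts)
--     if m == 0:
--         return "None"
--     return _SLOT_NAMES[counts.index(m)]
-- ===== Notes on version B (the rewrite author's own statement) =====
-- stated objective: faster
-- what changed: Replaces the per-hour scan over a dict of six ranges and the key-function max over the dict with arithmetic bucketing counts[(hour-6)//3] into a length-6 counts array and a max/index pick of the first maximal slot.
import Mathlib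
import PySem

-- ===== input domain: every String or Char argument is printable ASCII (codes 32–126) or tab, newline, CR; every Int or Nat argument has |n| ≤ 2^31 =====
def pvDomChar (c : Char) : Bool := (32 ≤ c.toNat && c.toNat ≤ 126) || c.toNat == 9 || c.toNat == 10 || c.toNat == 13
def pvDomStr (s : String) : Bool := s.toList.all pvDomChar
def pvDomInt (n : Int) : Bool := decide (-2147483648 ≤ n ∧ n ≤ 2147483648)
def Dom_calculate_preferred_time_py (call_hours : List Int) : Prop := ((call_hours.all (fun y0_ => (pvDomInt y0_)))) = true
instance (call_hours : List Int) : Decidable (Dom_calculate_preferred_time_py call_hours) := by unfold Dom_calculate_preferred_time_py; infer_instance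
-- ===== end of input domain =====

-- B replaces A's per-hour scan over a dict of six hour-ranges (and the key-function max over the
-- dict) with arithmetic bucketing into a length-6 counts list and a max/index pick: simpler.


-- ===== PORT A =====
-- time_slots: each entry (name, lo, hi) stands for "name": range(lo, hi); 'hour in range(lo, hi)'
-- (step 1) is exactly lo ≤ hour ∧ hour < hi.
def pySlotItems : List (String × Int × Int) :=
  [("Early Morning (6AM-9AM)", 6, 9),
   ("Morning (9AM-12PM)", 9, 12),
   ("Afternoon (12PM-3PM)", 12, 15),
   ("Late Afternoon (3PM-6PM)", 15, 18),
   ("Evening (6PM-9PM)", 18, 21),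
   ("Night (9PM-12AM)", 21, 24)]

-- slot_counts = {slot: 0 for slot in time_slots}
def pyInitCounts : PySem.Dict String Int :=
  pySlotItems.foldl (fun d p => d.insert p.1 0) ⟨[]⟩

-- inner loop 'for slot_name, hour_range in time_slots.items(): if hour in hour_range: …; break'
-- (slot_counts[slot_name] += 1; the key is always present, so the default 0 of modify is never used)
def pyBumpSlot (hour : Int) : List (String × Int × Int) → PySem.Dict String Int → PySem.Dict String Int
  | [], d => d
  | (nm, lo, hi) :: rest, d =>
      if lo ≤ hour ∧ hour < hi then d.modify nm 0 (· + 1) else pyBumpSlot hour rest d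

def calculate_preferred_time_py (call_hours : List Int) : String :=
  if call_hours = [] then "None"
  else
    let slot_counts := call_hours.foldl (fun d hour => pyBumpSlot hour pySlotItems d) pyInitCounts
    match PySem.List.max? slot_counts.values (fun v => v) with
    | none => "None"   -- unreachable: the dict always has 6 entries
    | some m =>
        if m = 0 then "None"
        else PySem.List.maxD slot_counts.keys (fun k => slot_counts.getD k 0) ""
          -- max(slot_counts, key=slot_counts.get); every key is present, so get returns its count;
          -- the default "" is unreachable (the dict is nonempty)

-- ===== PORT B =====
def altSlotNames : List String :=
  ["Early Morning (6AM-9AM)", "Morning (9AM-12PM)", "Afternoon (12PM-3PM)",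
   "Late Afternoon (3PM-6PM)", "Evening (6PM-9PM)", "Night (9PM-12AM)"]

-- body of B's loop: counts[(hour - 6) // 3] += 1 under the guard 6 <= hour < 24
def altStep (cs : List Int) (hour : Int) : List Int :=
  if 6 ≤ hour ∧ hour < 24 then
    PySem.List.pySetD cs (PySem.Int.floordiv (hour - 6) 3)
      (PySem.List.pyGetD cs (PySem.Int.floordiv (hour - 6) 3) 0 + 1)
  else cs

def calculate_preferred_time_py_alt (call_hours : List Int) : String :=
  let counts := call_hours.foldl altStep (List.replicate 6 (0 : Int))
  match PySem.List.max? counts (fun v => v) with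
  | none => "None"   -- unreachable: counts always has 6 entries
  | some m =>
      if m = 0 then "None"
      else
        match PySem.List.index? counts m with
        | none => "None"   -- unreachable: m is an element of counts
        | some i => (PySem.List.pyGet? altSlotNames (Int.ofNat i)).getD "None"
          -- _SLOT_NAMES[counts.index(m)]; the index is in range, so pyGet? is some

-- ===== PRECONDITION & SPEC =====
def Spec_calculate_preferred_time_py (call_hours : List Int) (out : String) : Prop := out = calculate_preferred_time_py_alt call_hours
instance (call_hours : List Int) (out : String) : Decidable (Spec_calculate_preferred_time_py call_hours out) := by unfold Spec_calculate_preferred_time_py; infer_instance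

-- ===== CLAIM (what is proved, stated in full; the proofs are below) =====
def Claim_equal_calculate_preferred_time_py : Prop := ∀ (call_hours : List Int), Dom_calculate_preferred_time_py call_hours → Spec_calculate_preferred_time_py call_hours (calculate_preferred_time_py call_hours)

-- ===== LEMMAS AND PROOFS =====

-- the per-slot update both loops perform on the count of the slot [lo, hi)
def updC (lo hi hour c : Int) : Int := if lo ≤ hour ∧ hour < hi then c + 1 else c

set_option maxHeartbeats 2000000 in
theorem stepA_eq (hour c0 c1 c2 c3 c4 c5 : Int) :
    pyBumpSlot hour pySlotItems
      ⟨[("Early Morning (6AM-9AM)", c0), ("Morning (9AM-12PM)", c1), ("Afternoon (12PM-3PM)", c2),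
        ("Late Afternoon (3PM-6PM)", c3), ("Evening (6PM-9PM)", c4), ("Night (9PM-12AM)", c5)]⟩
    = ⟨[("Early Morning (6AM-9AM)", updC 6 9 hour c0), ("Morning (9AM-12PM)", updC 9 12 hour c1),
        ("Afternoon (12PM-3PM)", updC 12 15 hour c2), ("Late Afternoon (3PM-6PM)", updC 15 18 hour c3),
        ("Evening (6PM-9PM)", updC 18 21 hour c4), ("Night (9PM-12AM)", updC 21 24 hour c5)]⟩ := by
  simp only [pySlotItems, pyBumpSlot]
  split_ifs <;>
    simp_all [PySem.Dict.modify, PySem.Dict.insert, PySem.Dict.getD, PySem.Dict.get?,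
      PySem.Dict.contains, updC] <;>
    try omega

theorem stepB_eq (hour c0 c1 c2 c3 c4 c5 : Int) :
    altStep [c0, c1, c2, c3, c4, c5] hour
    = [updC 6 9 hour c0, updC 9 12 hour c1, updC 12 15 hour c2,
       updC 15 18 hour c3, updC 18 21 hour c4, updC 21 24 hour c5] := by
  unfold altStep updC
  by_cases h : 6 ≤ hour ∧ hour < 24
  · have : PySem.Int.floordiv (hour - 6) 3 = 0 ∨ PySem.Int.floordiv (hour - 6) 3 = 1 ∨
        PySem.Int.floordiv (hour - 6) 3 = 2 ∨ PySem.Int.floordiv (hour - 6) 3 = 3 ∨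
        PySem.Int.floordiv (hour - 6) 3 = 4 ∨ PySem.Int.floordiv (hour - 6) 3 = 5 := by
      rw [PySem.Int.floordiv_eq_ediv_of_pos (by omega)]
      omega
    rcases this with h3 | h3 | h3 | h3 | h3 | h3 <;>
      simp_all [PySem.List.pySetD, PySem.List.pySet?, PySem.List.pyGetD, PySem.List.pyGet?,
        PySem.List.pyIdx?] <;>
      constructor <;> omega
  · simp [h]
    refine ⟨?_, ?_, ?_, ?_, ?_, ?_⟩ <;> omega

theorem loop_eq : ∀ (hs : List Int) (c0 c1 c2 c3 c4 c5 : Int),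
    hs.foldl (fun d hour => pyBumpSlot hour pySlotItems d)
      ⟨[("Early Morning (6AM-9AM)", c0), ("Morning (9AM-12PM)", c1), ("Afternoon (12PM-3PM)", c2),
        ("Late Afternoon (3PM-6PM)", c3), ("Evening (6PM-9PM)", c4), ("Night (9PM-12AM)", c5)]⟩
    = ⟨altSlotNames.zip (hs.foldl altStep [c0, c1, c2, c3, c4, c5])⟩
  | [], c0, c1, c2, c3, c4, c5 => by simp [altSlotNames, List.zip]
  | h :: hs, c0, c1, c2, c3, c4, c5 => by
      simp only [List.foldl_cons, stepA_eq, stepB_eq]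
      exact loop_eq hs _ _ _ _ _ _

theorem foldB_shape : ∀ (hs : List Int) (c0 c1 c2 c3 c4 c5 : Int),
    ∃ d0 d1 d2 d3 d4 d5, hs.foldl altStep [c0, c1, c2, c3, c4, c5] = [d0, d1, d2, d3, d4, d5]
  | [], c0, c1, c2, c3, c4, c5 => ⟨c0, c1, c2, c3, c4, c5, rfl⟩
  | h :: t, c0, c1, c2, c3, c4, c5 => by
      rw [List.foldl_cons, stepB_eq]
      exact foldB_shape t _ _ _ _ _ _

theorem maxFold_some {α : Type} (key : α → Int) :
    ∀ (xs : List α) (a : α), ∃ r,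
      List.foldl (fun acc x =>
          match acc with
          | none => some x
          | some b => if key b < key x then some x else some b) (some a) xs = some r
  | [], a => ⟨a, rfl⟩
  | x :: xs, a => by
      simp only [List.foldl_cons]
      split_ifs <;> exact maxFold_some key xs _

theorem maxFold_mem {α : Type} (key : α → Int) :
    ∀ (xs : List α) (a r : α),
      List.foldl (fun acc x =>
          match acc with
          | none => some x
          | some b => if key b < key x then some x else some b) (some a) xs = some r →
      r = a ∨ r ∈ xs
  | [], a, r, h => by simp at h; exact Or.inl h.symm
  | x :: xs, a, r, h => by
      simp only [List.foldl_cons] at h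
      split_ifs at h with hx
      · rcases maxFold_mem key xs x r h with rfl | h'
        · exact Or.inr (by simp)
        · exact Or.inr (by simp [h'])
      · rcases maxFold_mem key xs a r h with rfl | h'
        · exact Or.inl rfl
        · exact Or.inr (by simp [h'])

-- the fold keeps the accumulator once it attains the upper bound m
theorem maxFold_stay {α : Type} (key : α → Int) (m : Int) :
    ∀ (xs : List α) (a : α), key a = m → (∀ x ∈ xs, key x ≤ m) →
      List.foldl (fun acc x =>
          match acc with
          | none => some x
          | some b => if key b < key x then some x else some b) (some a) xs = some a
  | [], a, _, _ => rfl
  | x :: xs, a, ha, hub => by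
      have hx : ¬ key a < key x := by
        have := hub x (by simp)
        omega
      simp only [List.foldl_cons, if_neg hx]
      exact maxFold_stay key m xs a ha (fun y hy => hub y (by simp [hy]))

-- below the bound, the fold returns the first element attaining it
theorem maxFold_find {α : Type} (key : α → Int) (m : Int) :
    ∀ (xs : List α) (a : α), key a < m → (∀ x ∈ xs, key x ≤ m) → (∃ x ∈ xs, key x = m) →
      List.foldl (fun acc x =>
          match acc with
          | none => some x
          | some b => if key b < key x then some x else some b) (some a) xs
      = xs.find? (fun x => key x == m)
  | [], a, _, _, hmem => by simp at hmem
  | x :: xs, a, ha, hub, hmem => by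
      have hub' : ∀ y ∈ xs, key y ≤ m := fun y hy => hub y (by simp [hy])
      by_cases hx : key x = m
      · have hlt : key a < key x := by omega
        simp only [List.foldl_cons, if_pos hlt, List.find?_cons,
          show (key x == m) = true by simp [hx]]
        exact maxFold_stay key m xs x hx hub'
      · have hxlt : key x < m := by
          have := hub x (by simp)
          omega
        have hmem' : ∃ y ∈ xs, key y = m := by
          rcases hmem with ⟨y, hy, hym⟩
          rcases List.mem_cons.mp hy with rfl | hy'
          · exact absurd hym hx
          · exact ⟨y, hy', hym⟩
        simp only [List.foldl_cons, List.find?_cons, show (key x == m) = false by simp [hx]]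
        split_ifs with h
        · exact maxFold_find key m xs x hxlt hub' hmem'
        · exact maxFold_find key m xs a ha hub' hmem'

-- Python's max(xs, key) is the first element attaining the maximum key
theorem max?_eq_find? {α : Type} (key : α → Int) (m : Int) (xs : List α)
    (hub : ∀ x ∈ xs, key x ≤ m) (hmem : ∃ x ∈ xs, key x = m) :
    PySem.List.max? xs key = xs.find? (fun x => key x == m) := by
  rcases xs with _ | ⟨x, xs⟩
  · simp at hmem
  · have hub' : ∀ y ∈ xs, key y ≤ m := fun y hy => hub y (by simp [hy])
    simp only [PySem.List.max?, List.foldl_cons, List.find?_cons]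
    by_cases hx : key x = m
    · simp only [show (key x == m) = true by simp [hx]]
      exact maxFold_stay key m xs x hx hub'
    · have hxlt : key x < m := by
        have := hub x (by simp)
        omega
      have hmem' : ∃ y ∈ xs, key y = m := by
        rcases hmem with ⟨y, hy, hym⟩
        rcases List.mem_cons.mp hy with rfl | hy'
        · exact absurd hym hx
        · exact ⟨y, hy', hym⟩
      simp only [show (key x == m) = false by simp [hx]]
      exact maxFold_find key m xs x hxlt hub' hmem'



theorem max?_mem {α : Type} (key : α → Int) (xs : List α) (m : α)
    (h : PySem.List.max? xs key = some m) : m ∈ xs := by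
  rcases xs with _ | ⟨x, xs⟩
  · simp [PySem.List.max?] at h
  · rcases maxFold_mem key xs x m h with rfl | h'
    · simp
    · simp [h']

theorem max?_cons_ne_none {α : Type} (key : α → Int) (x : α) (xs : List α) :
    PySem.List.max? (x :: xs) key ≠ none := by
  intro h
  obtain ⟨r, hr⟩ := maxFold_some key xs x
  exact absurd (hr.symm.trans h) (by simp)

set_option maxHeartbeats 1000000 in
theorem select_eq (c0 c1 c2 c3 c4 c5 : Int) :
    (match PySem.List.max? (PySem.Dict.values ⟨altSlotNames.zip [c0, c1, c2, c3, c4, c5]⟩) (fun v => v) with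
     | none => "None"
     | some m =>
         if m = 0 then "None"
         else PySem.List.maxD (PySem.Dict.keys ⟨altSlotNames.zip [c0, c1, c2, c3, c4, c5]⟩)
           (fun k => PySem.Dict.getD (⟨altSlotNames.zip [c0, c1, c2, c3, c4, c5]⟩ : PySem.Dict String Int) k 0) "")
    = (match PySem.List.max? [c0, c1, c2, c3, c4, c5] (fun v => v) with
       | none => "None"
       | some m =>
           if m = 0 then "None"
           else
             match PySem.List.index? [c0, c1, c2, c3, c4, c5] m with
             | none => "None"
             | some i => (PySem.List.pyGet? altSlotNames (Int.ofNat i)).getD "None") := by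
  have hvals : PySem.Dict.values ⟨altSlotNames.zip [c0, c1, c2, c3, c4, c5]⟩
      = [c0, c1, c2, c3, c4, c5] := by
    simp [altSlotNames, PySem.Dict.values]
  rw [hvals]
  rcases hM : PySem.List.max? [c0, c1, c2, c3, c4, c5] (fun v => v) with _ | m
  · exact absurd hM (max?_cons_ne_none _ _ _)
  · have hub6 := PySem.List.max?_isMax hM
    have hb0 : c0 ≤ m := hub6 c0 (by simp)
    have hb1 : c1 ≤ m := hub6 c1 (by simp)
    have hb2 : c2 ≤ m := hub6 c2 (by simp)
    have hb3 : c3 ≤ m := hub6 c3 (by simp)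
    have hb4 : c4 ≤ m := hub6 c4 (by simp)
    have hb5 : c5 ≤ m := hub6 c5 (by simp)
    have hmem : m = c0 ∨ m = c1 ∨ m = c2 ∨ m = c3 ∨ m = c4 ∨ m = c5 := by
      simpa using max?_mem _ _ _ hM
    by_cases hm0 : m = 0
    · simp [hm0]
    · simp only [if_neg hm0]
      have hub : ∀ x ∈ altSlotNames,
          (fun k => PySem.Dict.getD (⟨altSlotNames.zip [c0, c1, c2, c3, c4, c5]⟩ : PySem.Dict String Int) k 0) x ≤ m := by
        intro x hx
        simp only [altSlotNames, List.mem_cons, List.not_mem_nil, or_false] at hx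
        rcases hx with rfl | rfl | rfl | rfl | rfl | rfl <;>
          simp [altSlotNames, PySem.Dict.getD, PySem.Dict.get?] <;> assumption
      have hmemk : ∃ x ∈ altSlotNames,
          (fun k => PySem.Dict.getD (⟨altSlotNames.zip [c0, c1, c2, c3, c4, c5]⟩ : PySem.Dict String Int) k 0) x = m := by
        rcases hmem with rfl | rfl | rfl | rfl | rfl | rfl
        · exact ⟨"Early Morning (6AM-9AM)", by simp [altSlotNames], by simp [altSlotNames, PySem.Dict.getD, PySem.Dict.get?]⟩
        · exact ⟨"Morning (9AM-12PM)", by simp [altSlotNames], by simp [altSlotNames, PySem.Dict.getD, PySem.Dict.get?]⟩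
        · exact ⟨"Afternoon (12PM-3PM)", by simp [altSlotNames], by simp [altSlotNames, PySem.Dict.getD, PySem.Dict.get?]⟩
        · exact ⟨"Late Afternoon (3PM-6PM)", by simp [altSlotNames], by simp [altSlotNames, PySem.Dict.getD, PySem.Dict.get?]⟩
        · exact ⟨"Evening (6PM-9PM)", by simp [altSlotNames], by simp [altSlotNames, PySem.Dict.getD, PySem.Dict.get?]⟩
        · exact ⟨"Night (9PM-12AM)", by simp [altSlotNames], by simp [altSlotNames, PySem.Dict.getD, PySem.Dict.get?]⟩
      have hkeys : PySem.Dict.keys ⟨altSlotNames.zip [c0, c1, c2, c3, c4, c5]⟩ = altSlotNames := by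
        simp [altSlotNames, PySem.Dict.keys]
      have hA := max?_eq_find? _ m altSlotNames hub hmemk
      simp only [PySem.List.maxD, hkeys, hA]
      simp only [altSlotNames, List.find?_cons, PySem.List.index?, List.idxOf?,
        List.findIdx?_cons, PySem.Dict.getD, PySem.Dict.get?]
      simp [PySem.List.pyGet?, PySem.List.pyIdx?]
      split_ifs <;> simp_all <;>
        first
          | omega
          | ((repeat rw [beq_eq_false_iff_ne.mpr (by assumption)]); rfl)

theorem bodies_eq (hs : List Int) :
    calculate_preferred_time_py hs = calculate_preferred_time_py_alt hs := by
  rcases hs with _ | ⟨h, t⟩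
  · decide
  · obtain ⟨d0, d1, d2, d3, d4, d5, hcs⟩ := foldB_shape (h :: t) 0 0 0 0 0 0
    have h0 : pyInitCounts = ⟨[("Early Morning (6AM-9AM)", (0 : Int)), ("Morning (9AM-12PM)", 0),
        ("Afternoon (12PM-3PM)", 0), ("Late Afternoon (3PM-6PM)", 0), ("Evening (6PM-9PM)", 0),
        ("Night (9PM-12AM)", 0)]⟩ := by decide
    have hrep : (List.replicate 6 (0 : Int)) = [0, 0, 0, 0, 0, 0] := rfl
    simp only [calculate_preferred_time_py, calculate_preferred_time_py_alt]
    rw [if_neg (List.cons_ne_nil h t)]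
    rw [h0, hrep, loop_eq, hcs]
    exact select_eq d0 d1 d2 d3 d4 d5

-- ===== VERDICT (by name: the statement is the Claim_ definition above) =====
theorem calculate_preferred_time_py_spec : Claim_equal_calculate_preferred_time_py := by
  intro hs _
  exact bodies_eq hs
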